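-- pv_equiv track=rewrite | github.com/PuneetBirdi/CCPS109 | labs109.py | domino_cycle
-- ===== SOURCE A (Python) =====
-- def domino_cycle(tiles):
--     num_of_tiles = len(tiles)
--
--     if num_of_tiles == 0:
--         return True
--
--     if num_of_tiles == 1 and tiles[0][0] == tiles[0][1]:
--         return True
--     elif num_of_tiles == 1 and tiles[0][0] != tiles[0][1]:
--         return False
--     elif tiles[0][0] != tiles[-1][1]:
--         return False
--
--     for idx, tile in enumerate(tiles):
--         if (idx + 1) != num_of_tiles:
--             if tile[1] != tiles[idx + 1][0]:
--                 return False
--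
--     return True
-- ===== SOURCE B (Python) =====
-- def domino_cycle(tiles):
--     firsts = [a for a, _ in tiles]
--     seconds = [b for _, b in tiles]
--     return seconds == firsts[1:] + firsts[:1]
-- ===== Notes on version B (the rewrite author's own statement) =====
-- stated objective: alternative
-- what changed: Instead of A's indexed adjacency scan with length-0/1 and wrap special cases, B projects the tiles into the list of first pips and the list of second pips and tests whole-list equality of the seconds against the firsts rotated left by one.
import Mathlib
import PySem

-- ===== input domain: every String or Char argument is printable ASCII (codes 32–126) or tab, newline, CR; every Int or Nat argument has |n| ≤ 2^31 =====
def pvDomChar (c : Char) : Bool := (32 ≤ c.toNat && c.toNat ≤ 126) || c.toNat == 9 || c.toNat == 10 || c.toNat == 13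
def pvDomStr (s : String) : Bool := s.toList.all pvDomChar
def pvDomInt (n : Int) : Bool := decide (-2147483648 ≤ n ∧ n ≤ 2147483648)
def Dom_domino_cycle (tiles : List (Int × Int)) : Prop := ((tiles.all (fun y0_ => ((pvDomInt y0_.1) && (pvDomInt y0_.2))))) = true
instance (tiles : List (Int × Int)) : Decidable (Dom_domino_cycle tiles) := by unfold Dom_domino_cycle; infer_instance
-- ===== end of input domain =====

-- B replaces A's indexed adjacency scan with special cases by projecting the tiles
-- into firsts/seconds lists and comparing seconds with firsts rotated left by one
-- (objective: alternative formulation, same cost).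

-- ===== PORT A =====
-- the for-loop with its early 'return False'; indexing tiles[idx+1] is in range
-- whenever the guard idx+1 ≠ n lets it run, so pyGetD is exact here
def dcLoopA (tiles : List (Int × Int)) (n : Int) : List (Int × (Int × Int)) → Bool
  | [] => true
  | (idx, tile) :: rest =>
      if idx + 1 ≠ n then
        if tile.2 ≠ (PySem.List.pyGetD tiles (idx + 1) (0, 0)).1 then false
        else dcLoopA tiles n rest
      else dcLoopA tiles n rest

def domino_cycle (tiles : List (Int × Int)) : Bool :=
  -- num_of_tiles = len(tiles), written inline as (tiles.length : Int)
  if (tiles.length : Int) = 0 then true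
  else if (tiles.length : Int) = 1 ∧ (PySem.List.pyGetD tiles 0 (0, 0)).1 = (PySem.List.pyGetD tiles 0 (0, 0)).2 then true
  else if (tiles.length : Int) = 1 ∧ (PySem.List.pyGetD tiles 0 (0, 0)).1 ≠ (PySem.List.pyGetD tiles 0 (0, 0)).2 then false
  else if (PySem.List.pyGetD tiles 0 (0, 0)).1 ≠ (PySem.List.pyGetD tiles (-1) (0, 0)).2 then false
  else dcLoopA tiles (tiles.length : Int) (PySem.List.enumerate tiles)

-- ===== PORT B =====
-- firsts = [a for a,_ in tiles]; seconds = [b for _,b in tiles];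
-- return seconds == firsts[1:] + firsts[:1]
def domino_cycle_alt (tiles : List (Int × Int)) : Bool :=
  let firsts := tiles.map Prod.fst
  let seconds := tiles.map Prod.snd
  seconds == PySem.List.slice firsts (some 1) none ++ PySem.List.slice firsts none (some 1)

-- ===== PRECONDITION & SPEC =====
def Spec_domino_cycle (tiles : List (Int × Int)) (out : Bool) : Prop := out = domino_cycle_alt tiles
instance (tiles : List (Int × Int)) (out : Bool) : Decidable (Spec_domino_cycle tiles out) := by unfold Spec_domino_cycle; infer_instance

-- ===== CLAIM (what is proved, stated in full; the proofs are below) =====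
def Claim_equal_domino_cycle : Prop := ∀ (tiles : List (Int × Int)), Dom_domino_cycle tiles → Spec_domino_cycle tiles (domino_cycle tiles)

-- ===== LEMMAS AND PROOFS =====

-- A's loop is an 'all' over the enumerate list
lemma dcLoopA_eq_all (tiles : List (Int × Int)) (n : Int) (l : List (Int × (Int × Int))) :
    dcLoopA tiles n l =
      l.all (fun p => (p.1 + 1 == n) || (p.2.2 == (PySem.List.pyGetD tiles (p.1 + 1) (0, 0)).1)) := by
  induction l with
  | nil => rfl
  | cons p rest ih =>
      obtain ⟨idx, tile⟩ := p
      simp only [dcLoopA, List.all_cons]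
      by_cases h1 : idx + 1 = n
      · simp [h1, ih]
      · by_cases h2 : tile.2 = (PySem.List.pyGetD tiles (idx + 1) (0, 0)).1
        · simp [h1, h2, ih]
        · simp [h1, h2]

-- B is the rotation test: seconds = firsts rotated left by one
lemma altB (tiles : List (Int × Int)) :
    domino_cycle_alt tiles =
      ((tiles.map Prod.snd) == (tiles.map Prod.fst).rotate 1) := by
  show ((tiles.map Prod.snd) ==
      PySem.List.slice (tiles.map Prod.fst) (some 1) none ++
        PySem.List.slice (tiles.map Prod.fst) none (some 1)) = _
  rcases tiles with _ | ⟨t, rs⟩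
  · rfl
  · rw [PySem.List.slice_from_one,
      show ((1 : Int)) = (((1 : Nat) : Int)) by norm_num, PySem.List.slice_to_natCast,
      List.rotate_eq_drop_append_take (by simp)]
    rfl

-- the rotation test, elementwise (getD form: valid indices, so the default is unused)
lemma altB_iff (tiles : List (Int × Int)) :
    domino_cycle_alt tiles = true ↔
      (∀ k, k < tiles.length →
        (tiles.getD k (0, 0)).2 =
          (tiles.getD ((k + 1) % tiles.length) (0, 0)).1) := by
  rw [altB, beq_iff_eq]
  constructor
  · intro he k hk
    have hm : (k + 1) % tiles.length < tiles.length := Nat.mod_lt _ (by omega)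
    rw [List.getD_eq_getElem _ _ hk, List.getD_eq_getElem _ _ hm]
    have h2 : k < (tiles.map Prod.snd).length := by simpa using hk
    have := List.getElem_of_eq he h2
    rw [List.getElem_rotate] at this
    simpa using this
  · intro hall
    apply List.ext_getElem
    · simp
    · intro k h1 h2
      rw [List.getElem_rotate]
      have hk : k < tiles.length := by simpa using h1
      have hm : (k + 1) % tiles.length < tiles.length := Nat.mod_lt _ (by omega)
      have := hall k hk
      rw [List.getD_eq_getElem _ _ hk, List.getD_eq_getElem _ _ hm] at this
      simpa using this

-- A (length ≥ 2) as a head/last check and an 'all' over List.range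
lemma aA (tiles : List (Int × Int)) (h : 2 ≤ tiles.length) :
    domino_cycle tiles =
      ((decide ((tiles.getD 0 (0, 0)).1 = (tiles.getD (tiles.length - 1) (0, 0)).2)) &&
        (List.range tiles.length).all
          (fun k => ((k + 1 : Nat) == tiles.length) ||
            ((tiles.getD k (0, 0)).2 == (tiles.getD (k + 1) (0, 0)).1))) := by
  unfold domino_cycle
  have h0 : (tiles.length : Int) ≠ 0 := by omega
  have h1 : ¬ ((tiles.length : Int) = 1 ∧ (PySem.List.pyGetD tiles 0 (0, 0)).1 = (PySem.List.pyGetD tiles 0 (0, 0)).2) := by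
    rintro ⟨e, -⟩; omega
  have h2 : ¬ ((tiles.length : Int) = 1 ∧ (PySem.List.pyGetD tiles 0 (0, 0)).1 ≠ (PySem.List.pyGetD tiles 0 (0, 0)).2) := by
    rintro ⟨e, -⟩; omega
  simp only [h0, h1, h2, if_false]
  have hneg : PySem.List.pyGetD tiles (-1) (0, 0) = tiles.getD (tiles.length - 1) (0, 0) := by
    rw [PySem.List.pyGetD_neg_ofNat tiles 1 (0, 0) (by omega) (by omega)]
    rw [List.getD_eq_getElem _ _ (by omega)]
  have hzero : PySem.List.pyGetD tiles 0 (0, 0) = tiles.getD 0 (0, 0) := by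
    rw [show ((0 : Int)) = ((0 : Nat) : Int) by simp, PySem.List.pyGetD_natCast]
  rw [hneg, hzero, dcLoopA_eq_all, PySem.List.enumerate_eq_map_pyRange tiles (0, 0),
    List.all_map, PySem.List.pyRange_one, List.all_map]
  by_cases hc : (tiles.getD 0 (0, 0)).1 = (tiles.getD (tiles.length - 1) (0, 0)).2
  · rw [if_neg (not_not_intro hc)]
    simp only [hc, decide_true, Bool.true_and]
    have hlen : (PySem.List.len tiles - 0).toNat = tiles.length := by
      simp [PySem.List.len_eq]
    rw [hlen]
    congr 1
    funext k
    simp only [Function.comp_apply]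
    rw [zero_add, show ((k : Int) + 1) = (((k + 1 : Nat)) : Int) from by push_cast; ring,
      PySem.List.pyGetD_natCast, PySem.List.pyGetD_natCast]
    have : ((((k + 1 : Nat)) : Int) == (tiles.length : Int)) = ((k + 1 : Nat) == tiles.length) := by
      rw [Bool.eq_iff_iff]
      simp only [beq_iff_eq]
      omega
    rw [this]
  · rw [if_pos hc]
    simp only [List.getD_eq_getElem?_getD] at hc
    simp [hc]

lemma main_eq (tiles : List (Int × Int)) : domino_cycle tiles = domino_cycle_alt tiles := by
  match tiles with
  | [] => decide
  | [t] =>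
      unfold domino_cycle
      rw [altB]
      by_cases hc : t.1 = t.2
      · simp [hc, PySem.List.pyGetD, PySem.List.pyIdx?, PySem.List.pyGet?, List.rotate]
      · simp [hc, Ne.symm hc, PySem.List.pyGetD, PySem.List.pyIdx?, PySem.List.pyGet?,
          List.rotate]
  | t :: u :: rs =>
      have h2 : 2 ≤ (t :: u :: rs).length := by simp
      rw [Bool.eq_iff_iff, aA _ h2, altB_iff]
      set xs := t :: u :: rs with hxs
      set n := xs.length with hn
      have hn2 : 2 ≤ n := h2
      simp only [Bool.and_eq_true, List.all_eq_true, List.mem_range, decide_eq_true_eq,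
        Bool.or_eq_true, beq_iff_eq]
      constructor
      · rintro ⟨hhead, hall⟩ k hk
        rcases Nat.lt_or_ge (k + 1) n with hlt | hge
        · rw [Nat.mod_eq_of_lt hlt]
          rcases hall k hk with he | hch
          · omega
          · exact hch
        · have he : k + 1 = n := by omega
          rw [he, Nat.mod_self]
          have : k = n - 1 := by omega
          rw [this]
          exact hhead.symm
      · intro hall
        refine ⟨?_, ?_⟩
        · have := hall (n - 1) (by omega)
          rw [show (n - 1 + 1) = n by omega, Nat.mod_self] at this
          exact this.symm
        · intro k hk
          rcases Nat.lt_or_ge (k + 1) n with hlt | hge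
          · right
            have := hall k hk
            rwa [Nat.mod_eq_of_lt hlt] at this
          · left; omega

-- ===== VERDICT (by name: the statement is the Claim_ definition above) =====
theorem domino_cycle_spec : Claim_equal_domino_cycle := by
  intro tiles _
  exact main_eq tiles
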